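-- pv_equiv track=rewrite | github.com/WXW322/tools_six | init_al/n-gramtree.py | get_idoms
-- ===== SOURCE A (Python) =====
-- def get_idoms(t_los):
--     t_idoms = []
--     t_len = len(t_los)
--     i = 0
--     while(i < t_len):
--         if(i == 0):
--             t_idoms.append((0,t_los[i]))
--         else:
--             t_idoms.append((t_los[i-1],t_los[i]))
--         i = i + 1
--     t_idoms.append((t_los[i - 1],-1))
--     #self.idoms = t_idoms
--     return t_idoms
-- ===== SOURCE B (Python) =====
-- def get_idoms(t_los):
--     # Build back-to-front: walk the list in reverse carrying the successor,
--     # so the terminal (last, -1) pair is produced first and the leading 0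
--     # pair falls out of the final accumulator state; then reverse once.
--     nxt = -1
--     rev_pairs = []
--     for x in reversed(t_los):
--         rev_pairs.append((x, nxt))
--         nxt = x
--     rev_pairs.append((0, nxt))
--     rev_pairs.reverse()
--     return rev_pairs
-- ===== Notes on version B (the rewrite author's own statement) =====
-- stated objective: alternative
-- what changed: Replaces A's forward index-counting while loop with its i==0 branch and trailing append by a single backward pass that carries the successor, emits the terminal (last,-1) pair first and the leading (0,first) pair last, then reverses the result.
import Mathlib
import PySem

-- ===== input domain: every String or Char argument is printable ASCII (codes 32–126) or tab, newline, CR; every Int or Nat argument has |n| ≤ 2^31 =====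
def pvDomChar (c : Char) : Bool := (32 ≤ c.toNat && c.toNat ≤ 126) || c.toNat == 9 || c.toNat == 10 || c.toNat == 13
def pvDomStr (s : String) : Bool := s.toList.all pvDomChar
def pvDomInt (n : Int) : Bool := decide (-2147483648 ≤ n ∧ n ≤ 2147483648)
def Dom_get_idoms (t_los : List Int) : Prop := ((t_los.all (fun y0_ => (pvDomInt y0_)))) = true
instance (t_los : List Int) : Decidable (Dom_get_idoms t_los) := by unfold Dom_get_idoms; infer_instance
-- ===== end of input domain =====

-- B replaces A's forward index-counting while loop (with its i==0 branch and trailing append)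
-- by a single backward pass carrying the successor — terminal pair first, then reverse
-- (objective: alternative; same cost).

-- ===== PORT A =====
-- A's while loop over i = 0..len-1 appending a pair per step, then the terminal append;
-- t_los[i] inside the loop is always in range, so pyGetD with a dummy default is exact there;
-- the final t_los[i-1] (= t_los[len-1]) is exact on Pre_ (t_los ≠ []).
def get_idoms (t_los : List Int) : List (Int × Int) :=
  let t_len : Int := t_los.length
  let loop : List (Int × Int) :=
    (PySem.List.pyRange 0 t_len 1).foldl
      (fun acc i =>
        if i = 0 then acc ++ [((0 : Int), PySem.List.pyGetD t_los i 0)]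
        else acc ++ [(PySem.List.pyGetD t_los (i - 1) 0, PySem.List.pyGetD t_los i 0)]) []
  loop ++ [(PySem.List.pyGetD t_los (t_len - 1) 0, -1)]

-- ===== PORT B =====
-- for x in reversed(t_los): append (x, nxt); nxt = x  — then append (0, nxt) and reverse.
def get_idoms_alt (t_los : List Int) : List (Int × Int) :=
  let st := t_los.reverse.foldl
    (fun (p : List (Int × Int) × Int) x => (p.1 ++ [(x, p.2)], x)) ([], -1)
  (st.1 ++ [((0 : Int), st.2)]).reverse

-- ===== PRECONDITION & SPEC =====
-- A raises IndexError on the empty list (t_los[-1] after the loop), so it is excluded.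
def Pre_get_idoms (t_los : List Int) : Prop := t_los ≠ []
instance (t_los : List Int) : Decidable (Pre_get_idoms t_los) := by unfold Pre_get_idoms; infer_instance
def pvWitness_get_idoms : List Int := ([3, 1, 4])

def Spec_get_idoms (t_los : List Int) (out : List (Int × Int)) : Prop := out = get_idoms_alt t_los
instance (t_los : List Int) (out : List (Int × Int)) : Decidable (Spec_get_idoms t_los out) := by unfold Spec_get_idoms; infer_instance

-- ===== CLAIM (what is proved, stated in full; the proofs are below) =====
def Claim_equal_get_idoms : Prop := ∀ (t_los : List Int), Dom_get_idoms t_los → Pre_get_idoms t_los → Spec_get_idoms t_los (get_idoms t_los)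

-- ===== LEMMAS AND PROOFS =====

-- The per-index pair A appends, as a function of the index.
lemma loop_eq_map (t_los : List Int) :
    (PySem.List.pyRange 0 (t_los.length : Int) 1).foldl
      (fun acc i =>
        if i = 0 then acc ++ [((0 : Int), PySem.List.pyGetD t_los i 0)]
        else acc ++ [(PySem.List.pyGetD t_los (i - 1) 0, PySem.List.pyGetD t_los i 0)]) []
    = (PySem.List.pyRange 0 (t_los.length : Int) 1).map
        (fun i => if i = 0 then ((0 : Int), PySem.List.pyGetD t_los i 0)
                  else (PySem.List.pyGetD t_los (i - 1) 0, PySem.List.pyGetD t_los i 0)) := by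
  have hfun : (fun (acc : List (Int × Int)) (i : Int) =>
        if i = 0 then acc ++ [((0 : Int), PySem.List.pyGetD t_los i 0)]
        else acc ++ [(PySem.List.pyGetD t_los (i - 1) 0, PySem.List.pyGetD t_los i 0)])
      = (fun acc i => acc ++ [if i = 0 then ((0 : Int), PySem.List.pyGetD t_los i 0)
              else (PySem.List.pyGetD t_los (i - 1) 0, PySem.List.pyGetD t_los i 0)]) := by
    funext acc i; split <;> rfl
  rw [hfun]
  simpa using PySem.List.foldl_append_singleton_eq_map
    (f := fun i => if i = 0 then ((0 : Int), PySem.List.pyGetD t_los i 0)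
              else (PySem.List.pyGetD t_los (i - 1) 0, PySem.List.pyGetD t_los i 0))
    (l := PySem.List.pyRange 0 (t_los.length : Int) 1) (acc := [])

lemma map_eq_zip (t_los : List Int) :
    (PySem.List.pyRange 0 (t_los.length : Int) 1).map
        (fun i => if i = 0 then ((0 : Int), PySem.List.pyGetD t_los i 0)
                  else (PySem.List.pyGetD t_los (i - 1) 0, PySem.List.pyGetD t_los i 0))
    = List.zip ((0 : Int) :: t_los) t_los := by
  apply List.ext_getElem
  · simp [PySem.List.length_pyRange_one, List.length_zip]
  · intro k h1 h2
    have hk : k < t_los.length := by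
      simpa [PySem.List.length_pyRange_one] using h1
    have hk' : k < (PySem.List.pyRange 0 (t_los.length : Int) 1).length := by
      simpa [PySem.List.length_pyRange_one] using hk
    have hr : (PySem.List.pyRange 0 (t_los.length : Int) 1)[k]'hk' = (k : Int) := by
      simpa using PySem.List.getElem_pyRange_one (a := 0) (b := (t_los.length : Int)) (k := k) hk'
    simp only [List.getElem_map, hr, List.getElem_zip]
    rcases Nat.eq_zero_or_pos k with rfl | hpos
    · have : t_los ≠ [] := by rintro rfl; simp at hk
      rw [PySem.List.pyGetD_eq_getElem t_los 0 (by omega) (by exact_mod_cast hk)]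
      simp
    · have hne : ((k : Int)) ≠ 0 := by exact_mod_cast Nat.pos_iff_ne_zero.mp hpos
      have hk1 : k - 1 < t_los.length := by omega
      have hcast : ((k : Int) - 1) = ((k - 1 : Nat) : Int) := by omega
      simp [PySem.List.pyGetD_natCast, hcast, List.getD_eq_getElem?_getD,
            List.getElem?_eq_getElem hk, List.getElem?_eq_getElem hk1,
            List.getElem_cons, hpos.ne']

-- B's backward-pass pairs, as a recursive function of the (reversed) list and the carried successor.
def sucPairs : List Int → Int → List (Int × Int)
  | [], _ => []
  | x :: xs, nxt => (x, nxt) :: sucPairs xs x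

-- B's foldl characterised by sucPairs and the final carried value.
lemma foldB_char (l : List Int) (acc : List (Int × Int)) (nxt : Int) :
    l.foldl (fun (p : List (Int × Int) × Int) x => (p.1 ++ [(x, p.2)], x)) (acc, nxt)
      = (acc ++ sucPairs l nxt, l.getLastD nxt) := by
  induction l generalizing acc nxt with
  | nil => simp [sucPairs]
  | cons x xs ih =>
    simp only [List.foldl_cons, ih, sucPairs, List.getLastD_cons]
    simp

-- The reversed backward pass is the list zipped with its successors.
lemma sucPairs_reverse (m : List Int) (nxt : Int) :
    (sucPairs m.reverse nxt).reverse = List.zip m (m.tail ++ [nxt]) := by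
  induction m using List.reverseRecOn generalizing nxt with
  | nil => simp [sucPairs]
  | append_singleton m y ih =>
    rw [List.reverse_append, List.reverse_singleton, List.singleton_append]
    show ((y, nxt) :: sucPairs m.reverse y).reverse = _
    rw [List.reverse_cons, ih]
    cases m with
    | nil => simp
    | cons x xs =>
      rw [show (((x :: xs : List Int) ++ [y]).tail) = xs ++ [y] from rfl,
          List.zip_append (by simp)]
      simp

-- Zipping a nonempty list with its successors extended by e splits off the (last, e) pair.
lemma zip_ext (xs : List Int) (x e : Int) :
    List.zip (x :: xs) (xs ++ [e]) = List.zip (x :: xs) xs ++ [((x :: xs).getLastD 0, e)] := by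
  induction xs generalizing x with
  | nil => simp
  | cons y ys ih =>
    rw [List.cons_append, List.zip_cons_cons, ih y, List.zip_cons_cons]
    simp

lemma last_eq (t_los : List Int) (h : t_los ≠ []) :
    PySem.List.pyGetD t_los ((t_los.length : Int) - 1) 0 = t_los.getLastD 0 := by
  have hlen : 0 < t_los.length := List.length_pos_of_ne_nil h
  have h1 : ((t_los.length : Int) - 1) = ((t_los.length - 1 : Nat) : Int) := by omega
  rw [h1, PySem.List.pyGetD_natCast]
  rw [List.getLastD_eq_getLast?, List.getLast?_eq_getElem?]
  simp [List.getD_eq_getElem?_getD,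
        List.getElem?_eq_getElem (by omega : t_los.length - 1 < t_los.length)]

-- ===== VERDICT (by name: the statement is the Claim_ definition above) =====
theorem get_idoms_spec : Claim_equal_get_idoms := by
  intro t_los _ hpre
  obtain ⟨x, xs, rfl⟩ : ∃ x xs, t_los = x :: xs := by
    cases t_los with
    | nil => exact absurd rfl hpre
    | cons x xs => exact ⟨x, xs, rfl⟩
  unfold Spec_get_idoms get_idoms get_idoms_alt
  simp only []
  rw [loop_eq_map, map_eq_zip, last_eq _ hpre, foldB_char, List.nil_append,
      List.reverse_append, List.reverse_singleton, List.singleton_append,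
      sucPairs_reverse, List.tail_cons, zip_ext, List.zip_cons_cons]
  simp [List.getLastD_eq_getLast?, List.getLast?_reverse]
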